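-- pv_equiv track=rewrite | github.com/Gnoyh/programmers | ps_64065.py | solution
-- ===== SOURCE A (Python) =====
-- def solution(s):
--     check_dict = {}
--
--     check_s = s.replace("{", "").replace("}", "").split(",")
--
--     for i in check_s:
--         i = int(i)
--
--         check_dict[i] = check_dict.get(i, 0) + 1
--
--     sorted_dict = sorted(check_dict.items(), key=lambda x: x[1], reverse=True)
--
--     return [i[0] for i in sorted_dict]
-- ===== SOURCE B (Python) =====
-- def solution(s):
--     tokens = s.replace("{", "").replace("}", "").split(",")
--     counts = {}
--     for t in tokens:
--         v = int(t)
--         counts[v] = counts.get(v, 0) + 1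
--     # bucket sort on frequency instead of a comparison sort
--     buckets = {}
--     for v, c in counts.items():
--         buckets.setdefault(c, []).append(v)
--     out = []
--     for c in range(len(tokens), 0, -1):
--         out.extend(buckets.get(c, []))
--     return out
-- ===== Notes on version B (the rewrite author's own statement) =====
-- stated objective: alternative
-- what changed: Replaces the stable comparison sort on frequencies with a counting/bucket pass: distinct elements are appended to a bucket keyed by their count in first-appearance order, and buckets are emitted from the highest count down, reproducing the stable descending order.
import Mathlib
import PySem

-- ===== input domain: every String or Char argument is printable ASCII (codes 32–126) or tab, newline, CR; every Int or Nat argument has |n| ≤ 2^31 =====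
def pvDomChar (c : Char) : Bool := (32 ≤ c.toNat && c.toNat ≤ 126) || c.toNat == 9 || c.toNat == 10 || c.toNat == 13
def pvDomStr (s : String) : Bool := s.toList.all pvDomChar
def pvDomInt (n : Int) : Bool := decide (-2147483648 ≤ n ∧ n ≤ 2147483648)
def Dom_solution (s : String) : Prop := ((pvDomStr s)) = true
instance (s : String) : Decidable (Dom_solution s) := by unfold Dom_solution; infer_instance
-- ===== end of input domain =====

-- B replaces A's stable comparison sort on frequencies by a counting/bucket pass
-- (buckets keyed by count, emitted from the highest count down); same return value.


-- the comma-split token list after dropping '{' and '}' (shared tokenisation of both Pythons)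
def pvTokens (s : String) : List String :=
  (PySem.Str.split? (PySem.Str.replace (PySem.Str.replace s "{" "") "}" "") ",").getD []

-- ===== PORT A =====
def solution (s : String) : List Int :=
  let check_s := pvTokens s
  let check_dict := check_s.foldl (fun d t =>
      let i := (PySem.Int.ofStr? t).getD 0   -- int(i); Pre_ guarantees some
      d.insert i (d.getD i 0 + 1)) (PySem.Dict.empty : PySem.Dict Int Int)
  let sorted_dict := PySem.List.sorted check_dict.items (fun x => x.2) true
  sorted_dict.map (fun x => x.1)

-- ===== PORT B =====
def solution_alt (s : String) : List Int :=
  let tokens := pvTokens s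
  let counts := tokens.foldl (fun d t =>
      let v := (PySem.Int.ofStr? t).getD 0   -- int(t); Pre_ guarantees some
      d.insert v (d.getD v 0 + 1)) (PySem.Dict.empty : PySem.Dict Int Int)
  let buckets := counts.items.foldl (fun d p => d.modify p.2 [] (fun l => l ++ [p.1]))
      (PySem.Dict.empty : PySem.Dict Int (List Int))
  (PySem.List.pyRange (tokens.length : Int) 0 (-1)).foldl
    (fun acc c => acc ++ buckets.getD c []) []

-- ===== PRECONDITION & SPEC =====
-- Pre_ excludes exactly the strings on which some comma-split token is not a Python
-- int literal, where A raises ValueError.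
def Pre_solution (s : String) : Prop := ∀ t ∈ pvTokens s, (PySem.Int.ofStr? t).isSome
instance (s : String) : Decidable (Pre_solution s) := by unfold Pre_solution; infer_instance
def pvWitness_solution : String := "{{2},{2,1},{2,1,3}}"

def Spec_solution (s : String) (out : List Int) : Prop := out = solution_alt s
instance (s : String) (out : List Int) : Decidable (Spec_solution s out) := by unfold Spec_solution; infer_instance

-- ===== CLAIM (what is proved, stated in full; the proofs are below) =====
def Claim_equal_solution : Prop := ∀ (s : String), Dom_solution s → Pre_solution s → Spec_solution s (solution s)

-- ===== LEMMAS AND PROOFS =====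

theorem insertBy_cons {α : Type} (before : α → α → Bool) (x y : α) (ys : List α) :
    PySem.List.insertBy before x (y :: ys) =
      if before x y then x :: y :: ys else y :: PySem.List.insertBy before x ys := rfl

theorem insertBy_append_not_before {α : Type} (before : α → α → Bool) (x : α)
    (as bs : List α) (h : ∀ a ∈ as, before x a = false) :
    PySem.List.insertBy before x (as ++ bs) = as ++ PySem.List.insertBy before x bs := by
  induction as with
  | nil => rfl
  | cons a as ih =>
      simp only [List.cons_append, insertBy_cons, h a (by simp)]
      simp only [Bool.false_eq_true, if_false, List.cons_inj_right]
      exact ih (fun a ha => h a (by simp [ha]))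

theorem insertBy_all_before {α : Type} (before : α → α → Bool) (x : α)
    (ys : List α) (h : ∀ y ∈ ys, before x y = true) :
    PySem.List.insertBy before x ys = x :: ys := by
  cases ys with
  | nil => rfl
  | cons y ys => simp [insertBy_cons, h y (by simp)]

theorem flatMap_ite_absent {α : Type} (x : α) (key : α → Int) (B : Int → List α)
    (cs : List Int) (h : ∀ c ∈ cs, key x ≠ c) :
    cs.flatMap (fun c => B c ++ if key x == c then [x] else []) = cs.flatMap B := by
  induction cs with
  | nil => rfl
  | cons c cs ih =>
      have hc : (key x == c) = false := by simp [h c (by simp)]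
      simp only [List.flatMap_cons, hc, Bool.false_eq_true, if_false, List.append_nil]
      rw [ih (fun c hc => h c (by simp [hc]))]

theorem insertBy_flatMap (key : α → Int) (x : α) (cs : List Int) (B : Int → List α)
    (hB : ∀ c ∈ cs, ∀ y ∈ B c, key y = c) (hcs : cs.Pairwise (· > ·)) (hx : key x ∈ cs) :
    PySem.List.insertBy (fun a b => decide (key b < key a)) x (cs.flatMap B)
      = cs.flatMap (fun c => B c ++ if key x == c then [x] else []) := by
  induction cs with
  | nil => cases hx
  | cons c cs ih =>
      rw [List.pairwise_cons] at hcs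
      simp only [List.flatMap_cons]
      by_cases h : key x = c
      · rw [insertBy_append_not_before _ _ _ _
          (fun a ha => by simp [hB c (by simp) a ha, h])]
        rw [insertBy_all_before _ _ _ (fun y hy => by
          simp only [List.mem_flatMap] at hy
          obtain ⟨c', hc', hy'⟩ := hy
          have := hB c' (by simp [hc']) y hy'
          simp [this, h, hcs.1 c' hc'])]
        rw [flatMap_ite_absent x key B cs
          (fun c' hc' => by have := hcs.1 c' hc'; omega)]
        simp [h]
      · have hx' : key x ∈ cs := by cases hx with
          | head => exact absurd rfl h
          | tail _ hm => exact hm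
        rw [insertBy_append_not_before _ _ _ _ (fun a ha => by
          have h1 := hB c (by simp) a ha
          have h2 := hcs.1 (key x) hx'
          simp [h1]; omega)]
        rw [ih (fun c' hc' => hB c' (by simp [hc'])) hcs.2 hx']
        simp [beq_iff_eq, h]

theorem sorted_rev_eq_flatMap_filter {α : Type} (key : α → Int) (cs : List Int)
    (hcs : cs.Pairwise (· > ·)) (l : List α) (hl : ∀ x ∈ l, key x ∈ cs) :
    PySem.List.sorted l key true = cs.flatMap (fun c => l.filter (fun x => key x == c)) := by
  rw [PySem.List.sorted_rev_eq_foldl_insertBy]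
  induction l using List.reverseRecOn with
  | nil => simp
  | append_singleton l x ih =>
      rw [List.foldl_append, List.foldl_cons, List.foldl_nil,
        ih (fun y hy => hl y (by simp [hy])),
        insertBy_flatMap key x cs (fun c => l.filter (fun y => key y == c))
          (fun c _ y hy => by
            simp only [List.mem_filter, beq_iff_eq] at hy; exact hy.2)
          hcs (hl x (by simp))]
      congr 1
      funext c
      simp [List.filter_append, List.filter_singleton]

-- pyRange n 0 (-1) is strictly decreasing
theorem pyRange_countdown_pairwise_gt (a b : Int) :
    (PySem.List.pyRange a b (-1)).Pairwise (· > ·) := by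
  rw [PySem.List.pyRange_neg_one_eq_reverse, List.pairwise_reverse]
  exact PySem.List.pairwise_lt_pyRange_one (b + 1) (a + 1)

-- B's bucket dict looked up at c gives exactly the c-count elements, in items order
theorem bucket_getD (items : List (Int × Int)) (c : Int) :
    (items.foldl (fun d p => d.modify p.2 [] (fun l => l ++ [p.1]))
        (PySem.Dict.empty : PySem.Dict Int (List Int))).getD c []
      = (items.filter (fun p => p.2 == c)).map (fun p => p.1) := by
  have h := PySem.Dict.getD_foldl_modify_append
    (items.map (fun p => (p.2, p.1))) (PySem.Dict.empty : PySem.Dict Int (List Int)) c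
  rw [List.foldl_map] at h
  simp only [PySem.Dict.getD_empty, List.nil_append] at h
  rw [h, List.filter_map, List.map_map]
  rfl

-- the counting loop of both ports builds Counter of the parsed tokens
theorem counts_eq (toks : List String) :
    toks.foldl (fun d t =>
        d.insert ((PySem.Int.ofStr? t).getD 0)
          (d.getD ((PySem.Int.ofStr? t).getD 0) 0 + 1)) (PySem.Dict.empty : PySem.Dict Int Int)
      = PySem.Dict.counter (toks.map fun t => (PySem.Int.ofStr? t).getD 0) := by
  rw [← PySem.Dict.foldl_insert_getD_add_one_eq_counter, List.foldl_map]

-- sort-then-project equals the bucket walk, for the counter of any int list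
theorem pipeline (ints : List Int) :
    (PySem.List.sorted (PySem.Dict.counter ints).items (fun p => p.2) true).map (fun p => p.1)
      = (PySem.List.pyRange (ints.length : Int) 0 (-1)).foldl
          (fun acc c => acc ++ ((PySem.Dict.counter ints).items.foldl
              (fun d p => d.modify p.2 [] (fun l => l ++ [p.1])) PySem.Dict.empty).getD c []) [] := by
  have hmem : ∀ p ∈ (PySem.Dict.counter ints).items,
      p.2 ∈ PySem.List.pyRange (ints.length : Int) 0 (-1) := by
    intro p hp
    rw [PySem.Dict.items_counter] at hp
    simp only [List.mem_map] at hp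
    obtain ⟨k, hk, rfl⟩ := hp
    rw [PySem.Set.mem_ofList] at hk
    dsimp only
    have h1 : 0 < ints.count k := List.count_pos_iff.mpr hk
    have h2 : ints.count k ≤ ints.length := List.count_le_length
    rw [PySem.List.mem_pyRange_neg_one]
    constructor <;> [exact_mod_cast h1; exact_mod_cast h2]
  rw [PySem.List.foldl_append_eq_flatMap, List.nil_append,
    sorted_rev_eq_flatMap_filter (fun p : Int × Int => p.2)
      (PySem.List.pyRange (ints.length : Int) 0 (-1))
      (pyRange_countdown_pairwise_gt (ints.length : Int) 0)
      (PySem.Dict.counter ints).items hmem,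
    List.map_flatMap]
  congr 1
  funext c
  rw [bucket_getD]

-- ===== VERDICT (by name: the statement is the Claim_ definition above) =====
theorem solution_spec : Claim_equal_solution := by
  intro s _ _
  unfold Spec_solution
  show solution s = solution_alt s
  simp only [solution, solution_alt, counts_eq]
  have h := pipeline ((pvTokens s).map fun t => (PySem.Int.ofStr? t).getD 0)
  rw [List.length_map] at h
  exact h
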